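-- pv_equiv track=rewrite | github.com/idkras/heroes-1c-extractor | advising_platform/src/mcp/modules/dependency_tracker.py | _update_dependencies
-- ===== SOURCE A (Python) =====
-- from typing import Dict, Any, List
--
-- def _update_dependencies(deps: List[str], source: str) -> List[Dict[str, Any]]:
--     """Обновляет зависимые файлы"""
--
--     updates = []
--
--     for dep in deps:
--         if "README.md" in dep:
--             updates.append({"file": dep, "action": "stats_refresh", "status": "updated"})
--         elif "matrix.json" in dep:
--             updates.append({"file": dep, "action": "dependency_sync", "status": "updated"})
--
--     return updates
-- ===== SOURCE B (Python) =====
-- from typing import Dict, Any, List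
--
-- def _update_dependencies(deps: List[str], source: str) -> List[Dict[str, Any]]:
--     """Обновляет зависимые файлы"""
--     readme_hits = [(i, d, "stats_refresh")
--                    for i, d in enumerate(deps) if "README.md" in d]
--     matrix_hits = [(i, d, "dependency_sync")
--                    for i, d in enumerate(deps)
--                    if "matrix.json" in d and "README.md" not in d]
--     hits = sorted(readme_hits + matrix_hits, key=lambda t: t[0])
--     return [{"file": d, "action": a, "status": "updated"} for _, d, a in hits]
-- ===== Notes on version B (the rewrite author's own statement) =====
-- stated objective: alternative
-- what changed: Replaces A's single if/elif accumulator loop with two staged filter passes (one per rule, the matrix pass excluding README hits) over enumerated deps, merged back into original order by sorting on the index.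
import Mathlib
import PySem

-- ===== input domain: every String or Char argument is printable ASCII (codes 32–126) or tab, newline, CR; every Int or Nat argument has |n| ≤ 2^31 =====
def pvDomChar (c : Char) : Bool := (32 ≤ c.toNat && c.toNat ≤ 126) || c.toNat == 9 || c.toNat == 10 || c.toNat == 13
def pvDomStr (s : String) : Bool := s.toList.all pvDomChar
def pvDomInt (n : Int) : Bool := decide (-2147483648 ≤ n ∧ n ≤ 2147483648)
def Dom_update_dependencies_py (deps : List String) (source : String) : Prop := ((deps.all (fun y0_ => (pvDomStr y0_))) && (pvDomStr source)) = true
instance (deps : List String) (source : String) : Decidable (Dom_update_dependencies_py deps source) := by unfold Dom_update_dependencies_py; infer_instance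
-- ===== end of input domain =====

-- B replaces A's if/elif accumulator loop with two staged filter passes over enumerated deps merged by index sort (alternative decomposition; return value only).


-- ===== PORT A =====
def update_dependencies_py (deps : List String) (source : String) : List (List (String × String)) :=
  deps.foldl (fun updates dep =>
    if PySem.Str.isIn "README.md" dep then
      updates ++ [[("file", dep), ("action", "stats_refresh"), ("status", "updated")]]
    else if PySem.Str.isIn "matrix.json" dep then
      updates ++ [[("file", dep), ("action", "dependency_sync"), ("status", "updated")]]
    else updates) []

-- ===== PORT B =====
def pvReadmeHits (deps : List String) : List (Int × String × String) :=
  (PySem.List.enumerate deps).filterMap (fun p =>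
    if PySem.Str.isIn "README.md" p.2 then some (p.1, p.2, "stats_refresh") else none)

def pvMatrixHits (deps : List String) : List (Int × String × String) :=
  (PySem.List.enumerate deps).filterMap (fun p =>
    if PySem.Str.isIn "matrix.json" p.2 && !PySem.Str.isIn "README.md" p.2 then
      some (p.1, p.2, "dependency_sync") else none)

def update_dependencies_py_alt (deps : List String) (source : String) : List (List (String × String)) :=
  (PySem.List.sorted (pvReadmeHits deps ++ pvMatrixHits deps) (fun t => t.1)).map
    (fun t => [("file", t.2.1), ("action", t.2.2), ("status", "updated")])

-- ===== PRECONDITION & SPEC =====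
def Spec_update_dependencies_py (deps : List String) (source : String) (out : List (List (String × String))) : Prop := out = update_dependencies_py_alt deps source
instance (deps : List String) (source : String) (out : List (List (String × String))) : Decidable (Spec_update_dependencies_py deps source out) := by unfold Spec_update_dependencies_py; infer_instance

-- ===== CLAIM (what is proved, stated in full; the proofs are below) =====
def Claim_equal_update_dependencies_py : Prop := ∀ (deps : List String) (source : String), Dom_update_dependencies_py deps source → Spec_update_dependencies_py deps source (update_dependencies_py deps source)

-- ===== LEMMAS AND PROOFS =====

-- the merged hit list in original order: one filterMap over enumerate with A's rule priority
def pvMerged (deps : List String) : List (Int × String × String) :=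
  (PySem.List.enumerate deps).filterMap (fun p =>
    if PySem.Str.isIn "README.md" p.2 then some (p.1, p.2, "stats_refresh")
    else if PySem.Str.isIn "matrix.json" p.2 then some (p.1, p.2, "dependency_sync")
    else none)

lemma pvMerged_perm (deps : List String) :
    (pvMerged deps).Perm (pvReadmeHits deps ++ pvMatrixHits deps) := by
  unfold pvMerged pvReadmeHits pvMatrixHits
  induction PySem.List.enumerate deps with
  | nil => simp
  | cons p rest ih =>
    by_cases h1 : PySem.Str.isIn "README.md" p.2 = true
    · rw [List.filterMap_cons_some (by rw [if_pos h1]),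
          List.filterMap_cons_some (by rw [if_pos h1]),
          List.filterMap_cons_none (by rw [h1]; simp), List.cons_append]
      exact ih.cons _
    · by_cases h2 : PySem.Str.isIn "matrix.json" p.2 = true
      · rw [List.filterMap_cons_some (by rw [if_neg h1, if_pos h2]),
            List.filterMap_cons_none (by rw [if_neg h1]),
            List.filterMap_cons_some
              (by rw [h2, Bool.eq_false_iff.mpr h1]; rfl)]
        exact (ih.cons _).trans (List.perm_middle).symm
      · rw [List.filterMap_cons_none (by rw [if_neg h1, if_neg h2]),
            List.filterMap_cons_none (by rw [if_neg h1]),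
            List.filterMap_cons_none (by rw [Bool.eq_false_iff.mpr h2]; simp)]
        exact ih

lemma pvMerged_pairwise (deps : List String) :
    (pvMerged deps).Pairwise (fun a b => a.1 < b.1) := by
  unfold pvMerged
  refine List.Pairwise.filterMap _ ?_ (PySem.List.pairwise_lt_enumerate deps 0)
  intro a b hab x hx y hy
  have hfst : ∀ (c : Int × String) (z : Int × String × String),
      (if PySem.Str.isIn "README.md" c.2 then some (c.1, c.2, "stats_refresh")
       else if PySem.Str.isIn "matrix.json" c.2 then some (c.1, c.2, "dependency_sync")
       else none) = some z → z.1 = c.1 := by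
    intro c z h
    split at h
    · cases h; rfl
    · split at h
      · cases h; rfl
      · cases h
  rw [hfst a x hx, hfst b y hy]; exact hab

lemma pv_sorted_eq_merged (deps : List String) :
    PySem.List.sorted (pvReadmeHits deps ++ pvMatrixHits deps) (fun t => t.1)
      = pvMerged deps :=
  PySem.List.sorted_eq_of_perm_of_pairwise_lt (key := fun t => t.1) _ _ (pvMerged_perm deps) (pvMerged_pairwise deps)

lemma pv_foldl_eq (deps : List String) (acc : List (List (String × String))) :
    deps.foldl (fun updates dep =>
      if PySem.Str.isIn "README.md" dep then
        updates ++ [[("file", dep), ("action", "stats_refresh"), ("status", "updated")]]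
      else if PySem.Str.isIn "matrix.json" dep then
        updates ++ [[("file", dep), ("action", "dependency_sync"), ("status", "updated")]]
      else updates) acc
    = acc ++ (pvMerged deps).map
        (fun t => [("file", t.2.1), ("action", t.2.2), ("status", "updated")]) := by
  -- generalize the enumerate start index
  suffices h : ∀ (s : Int) (acc : List (List (String × String))),
      deps.foldl (fun updates dep =>
        if PySem.Str.isIn "README.md" dep then
          updates ++ [[("file", dep), ("action", "stats_refresh"), ("status", "updated")]]
        else if PySem.Str.isIn "matrix.json" dep then
          updates ++ [[("file", dep), ("action", "dependency_sync"), ("status", "updated")]]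
        else updates) acc
      = acc ++ ((PySem.List.enumerate deps s).filterMap (fun p =>
          if PySem.Str.isIn "README.md" p.2 then some (p.1, p.2, "stats_refresh")
          else if PySem.Str.isIn "matrix.json" p.2 then some (p.1, p.2, "dependency_sync")
          else none)).map
          (fun t => [("file", t.2.1), ("action", t.2.2), ("status", "updated")]) by
    exact h 0 acc
  induction deps with
  | nil => intro s acc; simp [PySem.List.enumerate_nil]
  | cons d rest ih =>
    intro s acc
    rw [List.foldl_cons, PySem.List.enumerate_cons]
    by_cases h1 : PySem.Str.isIn "README.md" d = true
    · rw [if_pos h1, ih (s+1),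
          List.filterMap_cons_some (by rw [if_pos h1]), List.map_cons,
          List.append_assoc, List.singleton_append]
    · by_cases h2 : PySem.Str.isIn "matrix.json" d = true
      · rw [if_neg h1, if_pos h2, ih (s+1),
            List.filterMap_cons_some (by rw [if_neg h1, if_pos h2]), List.map_cons,
            List.append_assoc, List.singleton_append]
      · rw [if_neg h1, if_neg h2, ih (s+1),
            List.filterMap_cons_none (by rw [if_neg h1, if_neg h2])]

-- ===== VERDICT (by name: the statement is the Claim_ definition above) =====
theorem update_dependencies_py_spec : Claim_equal_update_dependencies_py := by
  intro deps source _
  unfold Spec_update_dependencies_py update_dependencies_py update_dependencies_py_alt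
  rw [pv_sorted_eq_merged]
  simpa using pv_foldl_eq deps []
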